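-- pv_equiv track=rewrite | github.com/Matt-Gleich/Get-Git-Status | gitStatus/main.py | getSectionFiles
-- ===== SOURCE A (Python) =====
-- def getSectionFiles(sectionIdentifier, command):
--     """Get the files for a certain part of the git status command
--
--     Arguments:
--         sectionIdentifier {str} -- The string that idenfies the file list section
--         command {list} -- The git status command ran
--
--     Returns:
--         list -- List of files if any
--     """
--     if sectionIdentifier not in command:
--         return []
--     files = []
--     listFromStart = command[command.index(sectionIdentifier):]
--     blankLineCount = 0
--     for line in listFromStart:
--         if "\t" in line:
--             files.append(line.strip("\t"))
--         elif blankLineCount == 1 and line == "":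
--             break
--         elif line == "":
--             blankLineCount += 1
--     return files
-- ===== SOURCE B (Python) =====
-- def getSectionFiles(sectionIdentifier, command):
--     if sectionIdentifier not in command:
--         return []
--     sub = command[command.index(sectionIdentifier):]
--     blanks = [i for i, l in enumerate(sub) if l == ""]
--     cutoff = blanks[1] if len(blanks) >= 2 else len(sub)
--     return [l.strip("\t") for l in sub[:cutoff] if "\t" in l]
-- ===== Notes on version B (the rewrite author's own statement) =====
-- stated objective: alternative
-- what changed: Replaces A's single interleaved loop that counts blank lines and collects tab lines with stateful early break by two independent passes: first find the blank-line indices and derive a cutoff (second blank index, or slice length), then filter-and-strip the truncated slice in one comprehension.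
import Mathlib
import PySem

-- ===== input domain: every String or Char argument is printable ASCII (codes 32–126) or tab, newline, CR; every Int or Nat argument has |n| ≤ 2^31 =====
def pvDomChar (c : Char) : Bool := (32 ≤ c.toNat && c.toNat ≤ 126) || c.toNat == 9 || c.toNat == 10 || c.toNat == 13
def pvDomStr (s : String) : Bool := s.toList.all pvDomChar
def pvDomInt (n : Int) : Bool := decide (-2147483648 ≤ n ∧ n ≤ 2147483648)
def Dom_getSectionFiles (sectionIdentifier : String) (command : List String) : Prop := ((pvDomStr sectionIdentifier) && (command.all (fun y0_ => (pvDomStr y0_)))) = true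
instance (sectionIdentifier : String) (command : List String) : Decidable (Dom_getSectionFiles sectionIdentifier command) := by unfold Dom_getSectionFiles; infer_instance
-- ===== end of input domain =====

-- B replaces A's interleaved counting/collecting loop by a boundary-finding pass (blank-line
-- indices) followed by a separate filter-and-strip pass over the truncated slice (objective: alternative decomposition).

-- ===== PORT A =====
def pvLoopA : List String → List String → Int → List String
  | [], files, _ => files
  | line :: rest, files, blankLineCount =>
    if PySem.Str.isIn "\t" line then
      pvLoopA rest (files ++ [PySem.Str.stripChars line "\t"]) blankLineCount
    else if blankLineCount == 1 && line == "" then files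
    else if line == "" then pvLoopA rest files (blankLineCount + 1)
    else pvLoopA rest files blankLineCount

def getSectionFiles (sectionIdentifier : String) (command : List String) : List String :=
  if sectionIdentifier ∈ command then
    match PySem.List.index? command sectionIdentifier with
    | some i => pvLoopA (PySem.List.slice command (some (i : Int)) none) [] 0
    | none => []
  else []

-- ===== PORT B =====
def getSectionFiles_alt (sectionIdentifier : String) (command : List String) : List String :=
  if sectionIdentifier ∈ command then
    match PySem.List.index? command sectionIdentifier with
    | some i =>
      let sub := PySem.List.slice command (some (i : Int)) none
      let blanks := ((PySem.List.enumerate sub 0).filter (fun p => p.2 == "")).map (·.1)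
      let cutoff : Int := if 2 ≤ blanks.length then PySem.List.pyGetD blanks 1 0 else (sub.length : Int)
      ((PySem.List.slice sub none (some cutoff)).filter
          (fun l => PySem.Str.isIn "\t" l)).map (fun l => PySem.Str.stripChars l "\t")
    | none => []
  else []

-- ===== PRECONDITION & SPEC =====
def Spec_getSectionFiles (sectionIdentifier : String) (command : List String) (out : List String) : Prop := out = getSectionFiles_alt sectionIdentifier command
instance (sectionIdentifier : String) (command : List String) (out : List String) : Decidable (Spec_getSectionFiles sectionIdentifier command out) := by unfold Spec_getSectionFiles; infer_instance

-- ===== CLAIM (what is proved, stated in full; the proofs are below) =====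
def Claim_equal_getSectionFiles : Prop := ∀ (sectionIdentifier : String) (command : List String), Dom_getSectionFiles sectionIdentifier command → Spec_getSectionFiles sectionIdentifier command (getSectionFiles sectionIdentifier command)

-- ===== LEMMAS AND PROOFS =====

-- index (or length if none) of the first / second blank line
def pvCut1 : List String → Nat
  | [] => 0
  | x :: r => if x = "" then 0 else pvCut1 r + 1

def pvCut2 : List String → Nat
  | [] => 0
  | x :: r => if x = "" then pvCut1 r + 1 else pvCut2 r + 1

-- the blank-index list B computes, in structural form
def pvBlk (xs : List String) (s : Int) : List Int :=
  ((PySem.List.enumerate xs s).filter (fun p => p.2 == "")).map (·.1)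

theorem pvBlk_nil (s : Int) : pvBlk [] s = [] := rfl

theorem pvBlk_cons (x : String) (r : List String) (s : Int) :
    pvBlk (x :: r) s = if x = "" then s :: pvBlk r (s + 1) else pvBlk r (s + 1) := by
  simp [pvBlk, PySem.List.enumerate_cons, List.filter_cons]
  split_ifs with h <;> simp_all

theorem pvTab_nil : PySem.Chars.isIn ['\t'] ([] : List Char) = false := by decide

theorem pvTab_ne_empty {x : String} (h : PySem.Chars.isIn ['\t'] x.toList = true) : x ≠ "" := by
  intro he; subst he; exact absurd h (by decide)

theorem pvBlk0_cut1 : ∀ (xs : List String) (s : Int),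
    pvBlk xs s = [] → pvCut1 xs = xs.length := by
  intro xs
  induction xs with
  | nil => intro s _; rfl
  | cons x r ih =>
    intro s h
    rw [pvBlk_cons] at h
    by_cases hx : x = "" <;> simp [hx, pvCut1] at h ⊢
    exact ih (s + 1) h

theorem pvBlk1_cut1 : ∀ (xs : List String) (s : Int),
    1 ≤ (pvBlk xs s).length → (pvBlk xs s)[0]?.getD 0 = s + pvCut1 xs := by
  intro xs
  induction xs with
  | nil => intro s h; simp [pvBlk_nil] at h
  | cons x r ih =>
    intro s h
    rw [pvBlk_cons] at h ⊢
    by_cases hx : x = "" <;> simp [hx, pvCut1]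
    have := ih (s + 1) (by simpa [hx] using h)
    rw [this]; ring

theorem pvBlk2_cut2 : ∀ (xs : List String) (s : Int),
    2 ≤ (pvBlk xs s).length → (pvBlk xs s)[1]?.getD 0 = s + pvCut2 xs := by
  intro xs
  induction xs with
  | nil => intro s h; simp [pvBlk_nil] at h
  | cons x r ih =>
    intro s h
    rw [pvBlk_cons] at h ⊢
    by_cases hx : x = "" <;> simp [hx, pvCut2]
    · have h1 : 1 ≤ (pvBlk r (s + 1)).length := by simp [hx] at h; omega
      rw [pvBlk1_cut1 r (s + 1) h1]; ring
    · have := ih (s + 1) (by simpa [hx] using h)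
      rw [this]; ring

theorem pvBlkLt2_cut2 : ∀ (xs : List String) (s : Int),
    (pvBlk xs s).length ≤ 1 → pvCut2 xs = xs.length := by
  intro xs
  induction xs with
  | nil => intro s _; rfl
  | cons x r ih =>
    intro s h
    rw [pvBlk_cons] at h
    by_cases hx : x = "" <;> simp [hx, pvCut2] at h ⊢
    · exact pvBlk0_cut1 r (s + 1) h
    · exact ih (s + 1) h

theorem pvLoopA_one : ∀ (xs files : List String),
    pvLoopA xs files 1 =
      files ++ ((xs.take (pvCut1 xs)).filter (fun l => PySem.Str.isIn "\t" l)).map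
        (fun l => PySem.Str.stripChars l "\t") := by
  intro xs
  induction xs with
  | nil => intro files; simp [pvLoopA]
  | cons x r ih =>
    intro files
    by_cases ht : PySem.Chars.isIn ['\t'] x.toList = true
    · have hx := pvTab_ne_empty ht
      simp [pvLoopA, ht, pvCut1, hx, ih]
    · by_cases hx : x = ""
      · simp [pvLoopA, pvTab_nil, hx, pvCut1]
      · simp [pvLoopA, ht, hx, pvCut1, ih]

theorem pvLoopA_zero : ∀ (xs files : List String),
    pvLoopA xs files 0 =
      files ++ ((xs.take (pvCut2 xs)).filter (fun l => PySem.Str.isIn "\t" l)).map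
        (fun l => PySem.Str.stripChars l "\t") := by
  intro xs
  induction xs with
  | nil => intro files; simp [pvLoopA]
  | cons x r ih =>
    intro files
    by_cases ht : PySem.Chars.isIn ['\t'] x.toList = true
    · have hx := pvTab_ne_empty ht
      simp [pvLoopA, ht, pvCut2, hx, ih]
    · by_cases hx : x = ""
      · simp [pvLoopA, pvTab_nil, hx, pvCut2, pvLoopA_one]
      · simp [pvLoopA, ht, hx, pvCut2, ih]

theorem pvCore_eq (sub : List String) :
    pvLoopA sub [] 0 =
      ((PySem.List.slice sub none
          (some (if 2 ≤ (pvBlk sub 0).length then PySem.List.pyGetD (pvBlk sub 0) 1 0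
                 else (sub.length : Int)))).filter
        (fun l => PySem.Str.isIn "\t" l)).map (fun l => PySem.Str.stripChars l "\t") := by
  rw [pvLoopA_zero sub []]
  by_cases h2 : 2 ≤ (pvBlk sub 0).length
  · have hg : PySem.List.pyGetD (pvBlk sub 0) 1 0 = (pvCut2 sub : Int) := by
      have := pvBlk2_cut2 sub 0 h2
      rw [PySem.List.pyGetD_eq_getElem (xs := pvBlk sub 0) (i := 1) (d := 0) (by omega)
            (by exact_mod_cast h2)]
      simp only [List.getElem?_eq_getElem (by omega : 1 < (pvBlk sub 0).length)] at this
      simpa using this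
    rw [if_pos h2, hg, PySem.List.slice_to_natCast]
    simp
  · rw [if_neg h2, pvBlkLt2_cut2 sub 0 (by omega), PySem.List.slice_to_natCast]
    simp

-- ===== VERDICT (by name: the statement is the Claim_ definition above) =====
theorem getSectionFiles_spec : Claim_equal_getSectionFiles := by
  intro sid cmd _
  unfold Spec_getSectionFiles getSectionFiles getSectionFiles_alt
  by_cases hm : sid ∈ cmd
  · simp only [if_pos hm]
    cases h : PySem.List.index? cmd sid with
    | none => rfl
    | some i => exact pvCore_eq _
  · simp [hm]
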